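-- pv_equiv track=rewrite | github.com/mariiio/rally-cut | analysis/scripts/eval_match_players.py | find_best_permutation
-- ===== SOURCE A (Python) =====
-- import itertools
--
-- def find_best_permutation(
--     gt_rallies: dict[str, dict[str, int]],
--     pred_rallies: dict[str, dict[str, int]],
-- ) -> tuple[dict[int, int], int, int]:
--     """Find the optimal permutation mapping predicted player IDs to GT player IDs.
--
--     Brute-force tries all 24 permutations of {1,2,3,4} to find the one
--     that maximizes agreement between predicted and GT assignments.
--
--     Args:
--         gt_rallies: rally_id -> {track_id_str: gt_player_id}
--         pred_rallies: rally_id -> {track_id_str: pred_player_id}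
--
--     Returns:
--         Tuple of (best_permutation, correct_count, total_count) where
--         best_permutation maps predicted_pid -> gt_pid.
--     """
--     player_ids = [1, 2, 3, 4]
--     best_perm: dict[int, int] = {}
--     best_correct = -1
--     best_total = 0
--
--     for perm in itertools.permutations(player_ids):
--         # perm[i] = GT player ID that predicted player (i+1) maps to
--         pred_to_gt = {pid: gpid for pid, gpid in zip(player_ids, perm)}
--
--         correct = 0
--         total = 0
--
--         for rid in gt_rallies:
--             if rid not in pred_rallies:
--                 continue
--             gt = gt_rallies[rid]
--             pred = pred_rallies[rid]
--
--             for tid_str in gt: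
--                 if tid_str not in pred:
--                     continue
--                 total += 1
--                 gt_pid = gt[tid_str]
--                 pred_pid = pred[tid_str]
--                 mapped_pid = pred_to_gt.get(pred_pid)
--                 if mapped_pid == gt_pid:
--                     correct += 1
--
--         if correct > best_correct:
--             best_correct = correct
--             best_total = total
--             best_perm = pred_to_gt
--
--     return best_perm, best_correct, best_total
-- ===== SOURCE B (Python) =====
-- import itertools
--
--
-- def find_best_permutation(
--     gt_rallies: dict[str, dict[str, int]],
--     pred_rallies: dict[str, dict[str, int]],
-- ) -> tuple[dict[int, int], int, int]:
--     """One pass over the data builds a (pred_pid, gt_pid) confusion counter and the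
--     matched-pair total; each of the 24 permutations is then scored from the counter."""
--     player_ids = [1, 2, 3, 4]
--     conf: dict[tuple[int, int], int] = {}
--     total = 0
--     for rid, gt in gt_rallies.items():
--         pred = pred_rallies.get(rid)
--         if pred is None:
--             continue
--         for tid_str, gt_pid in gt.items():
--             if tid_str not in pred:
--                 continue
--             pred_pid = pred[tid_str]
--             conf[(pred_pid, gt_pid)] = conf.get((pred_pid, gt_pid), 0) + 1
--             total += 1
--
--     best_perm: dict[int, int] = {}
--     best_correct = -1
--     best_total = 0
--     for perm in itertools.permutations(player_ids):
--         pred_to_gt = dict(zip(player_ids, perm))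
--         correct = 0
--         for p in player_ids:
--             correct += conf.get((p, pred_to_gt[p]), 0)
--         if correct > best_correct:
--             best_correct = correct
--             best_total = total
--             best_perm = pred_to_gt
--     return best_perm, best_correct, best_total
-- ===== Notes on version B (the rewrite author's own statement) =====
-- stated objective: faster
-- what changed: Instead of rescanning all rally data for each of the 24 permutations, B makes one pass building a (pred_pid, gt_pid) confusion counter plus the matched total and then scores every permutation from the 16-at-most counter entries.
import Mathlib
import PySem

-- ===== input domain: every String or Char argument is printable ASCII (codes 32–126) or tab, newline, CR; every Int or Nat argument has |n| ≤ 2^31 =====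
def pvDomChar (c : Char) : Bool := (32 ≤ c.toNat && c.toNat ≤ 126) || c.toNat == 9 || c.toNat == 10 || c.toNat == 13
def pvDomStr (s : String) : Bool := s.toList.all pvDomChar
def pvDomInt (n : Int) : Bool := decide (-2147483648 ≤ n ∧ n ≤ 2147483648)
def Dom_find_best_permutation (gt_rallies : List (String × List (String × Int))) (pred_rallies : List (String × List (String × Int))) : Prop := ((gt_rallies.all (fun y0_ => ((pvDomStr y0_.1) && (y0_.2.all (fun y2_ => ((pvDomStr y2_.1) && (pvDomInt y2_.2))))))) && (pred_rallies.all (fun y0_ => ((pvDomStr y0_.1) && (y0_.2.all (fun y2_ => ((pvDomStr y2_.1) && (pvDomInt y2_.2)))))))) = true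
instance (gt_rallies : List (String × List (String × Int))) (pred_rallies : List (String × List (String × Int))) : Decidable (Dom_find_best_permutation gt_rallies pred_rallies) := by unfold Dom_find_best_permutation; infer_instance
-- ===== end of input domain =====

-- B replaces A's rescan of all rally data for each of the 24 permutations by one pass
-- building a (pred_pid, gt_pid) confusion counter, then scores permutations from the counter (objective: faster).

-- ===== PORT A =====
def find_best_permutation (gt_rallies : List (String × List (String × Int))) (pred_rallies : List (String × List (String × Int))) : (List (Int × Int)) × Int × Int :=
  let player_ids : List Int := [1, 2, 3, 4]
  let res := (PySem.List.permutations player_ids 4).foldl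
    (fun (st : PySem.Dict Int Int × Int × Int) perm =>
      let pred_to_gt := PySem.Dict.ofList (player_ids.zip perm)
      let ct := (PySem.Dict.ofList gt_rallies).items.foldl
        (fun (ct : Int × Int) rg =>
          match (PySem.Dict.ofList pred_rallies).get? rg.1 with
          | none => ct
          | some predv =>
            (PySem.Dict.ofList rg.2).items.foldl
              (fun (ct : Int × Int) tg =>
                match (PySem.Dict.ofList predv).get? tg.1 with
                | none => ct
                | some pred_pid =>
                  -- total += 1; mapped_pid = pred_to_gt.get(pred_pid); if mapped_pid == gt_pid: correct += 1
                  (if pred_to_gt.get? pred_pid == some tg.2 then ct.1 + 1 else ct.1, ct.2 + 1))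
              ct) ((0 : Int), (0 : Int))
      if ct.1 > st.2.1 then (pred_to_gt, ct.1, ct.2) else st)
    (PySem.Dict.empty, -1, 0)
  (res.1.items, res.2)

-- ===== PORT B =====
def find_best_permutation_alt (gt_rallies : List (String × List (String × Int))) (pred_rallies : List (String × List (String × Int))) : (List (Int × Int)) × Int × Int :=
  let player_ids : List Int := [1, 2, 3, 4]
  -- one pass: confusion counter conf[(pred_pid, gt_pid)] += 1 and total += 1 per matched pair
  let ct := (PySem.Dict.ofList gt_rallies).items.foldl
    (fun (st : PySem.Dict (Int × Int) Int × Int) rg =>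
      match (PySem.Dict.ofList pred_rallies).get? rg.1 with
      | none => st
      | some predv =>
        (PySem.Dict.ofList rg.2).items.foldl
          (fun (st : PySem.Dict (Int × Int) Int × Int) tg =>
            match (PySem.Dict.ofList predv).get? tg.1 with
            | none => st
            | some pred_pid =>
              (st.1.insert (pred_pid, tg.2) (st.1.getD (pred_pid, tg.2) 0 + 1), st.2 + 1)) st)
    (PySem.Dict.empty, (0 : Int))
  let res := (PySem.List.permutations player_ids 4).foldl
    (fun (st : PySem.Dict Int Int × Int × Int) perm =>
      let pred_to_gt := PySem.Dict.ofList (player_ids.zip perm)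
      -- pred_to_gt[p] never raises: p is always a key (getD's default is never used)
      let correct := player_ids.foldl (fun acc p => acc + ct.1.getD (p, pred_to_gt.getD p 0) 0) 0
      if correct > st.2.1 then (pred_to_gt, correct, ct.2) else st)
    (PySem.Dict.empty, -1, 0)
  (res.1.items, res.2)

-- ===== PRECONDITION & SPEC =====
def Spec_find_best_permutation (gt_rallies : List (String × List (String × Int))) (pred_rallies : List (String × List (String × Int))) (out : (List (Int × Int)) × Int × Int) : Prop := out = find_best_permutation_alt gt_rallies pred_rallies
instance (gt_rallies : List (String × List (String × Int))) (pred_rallies : List (String × List (String × Int))) (out : (List (Int × Int)) × Int × Int) : Decidable (Spec_find_best_permutation gt_rallies pred_rallies out) := by unfold Spec_find_best_permutation; infer_instance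

-- ===== CLAIM (what is proved, stated in full; the proofs are below) =====
def Claim_equal_find_best_permutation : Prop := ∀ (gt_rallies : List (String × List (String × Int))) (pred_rallies : List (String × List (String × Int))), Dom_find_best_permutation gt_rallies pred_rallies → Spec_find_best_permutation gt_rallies pred_rallies (find_best_permutation gt_rallies pred_rallies)

-- ===== LEMMAS AND PROOFS =====

-- the flat list of matched (pred_pid, gt_pid) pairs both programs traverse
def matchedPairs (gt_rallies pred_rallies : List (String × List (String × Int))) : List (Int × Int) :=
  (PySem.Dict.ofList gt_rallies).items.flatMap (fun rg =>
    match (PySem.Dict.ofList pred_rallies).get? rg.1 with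
    | none => []
    | some predv => (PySem.Dict.ofList rg.2).items.filterMap (fun tg =>
        ((PySem.Dict.ofList predv).get? tg.1).map (fun p => (p, tg.2))))

-- both nested rally/track loops are a fold of their step function over matchedPairs
theorem nested_foldl_eq {σ : Type} (gt_rallies pred_rallies : List (String × List (String × Int)))
    (f : σ → Int × Int → σ) (s0 : σ) :
    (PySem.Dict.ofList gt_rallies).items.foldl
      (fun s rg =>
        match (PySem.Dict.ofList pred_rallies).get? rg.1 with
        | none => s
        | some predv =>
          (PySem.Dict.ofList rg.2).items.foldl
            (fun s tg =>
              match (PySem.Dict.ofList predv).get? tg.1 with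
              | none => s
              | some pred_pid => f s (pred_pid, tg.2)) s) s0
    = (matchedPairs gt_rallies pred_rallies).foldl f s0 := by
  unfold matchedPairs
  rw [List.foldl_flatMap]
  apply PySem.List.foldl_congr_mem
  intro s rg _
  cases h : (PySem.Dict.ofList pred_rallies).get? rg.1 with
  | none => simp
  | some predv =>
    rw [List.foldl_filterMap]
    apply PySem.List.foldl_congr_mem
    intro s tg _
    cases (PySem.Dict.ofList predv).get? tg.1 <;> simp

theorem pair_foldl_split {α β γ : Type} (L : List γ) (f : α → γ → α) (g : β → γ → β) (a0 : α) (b0 : β) :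
    L.foldl (fun st x => (f st.1 x, g st.2 x)) (a0, b0) = (L.foldl f a0, L.foldl g b0) := by
  induction L generalizing a0 b0 with
  | nil => rfl
  | cons x L ih => simpa using ih (f a0 x) (g b0 x)

theorem foldl_count (q : Int × Int → Bool) (L : List (Int × Int)) (c0 : Int) :
    L.foldl (fun c x => if q x then c + 1 else c) c0 = c0 + (L.countP q : Int) := by
  induction L generalizing c0 with
  | nil => simp
  | cons x L ih => by_cases h : q x <;> simp [h, ih] <;> omega

theorem foldl_len {γ : Type} (L : List γ) (t0 : Int) :
    L.foldl (fun t _ => t + 1) t0 = t0 + (L.length : Int) := by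
  induction L generalizing t0 with
  | nil => simp
  | cons x L ih => simp [ih]; omega

theorem get4 (a b c d p : Int) :
    (PySem.Dict.mk [(1, a), (2, b), (3, c), (4, d)]).get? p
    = if 1 = p then some a else if 2 = p then some b else if 3 = p then some c else if 4 = p then some d else none := by
  simp only [PySem.Dict.get?_mk_cons, beq_iff_eq]
  rfl

theorem count_split (a b c d : Int) (M : List (Int × Int)) :
    (M.countP (fun x => (PySem.Dict.mk [(1, a), (2, b), (3, c), (4, d)]).get? x.1 == some x.2) : Int)
    = (M.count (1, a) : Int) + M.count (2, b) + M.count (3, c) + M.count (4, d) := by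
  induction M with
  | nil => simp
  | cons x M ih =>
    obtain ⟨p, g⟩ := x
    simp only [List.countP_cons, List.count_cons]
    push_cast
    rw [ih, get4]
    split_ifs with h1 h2 h3 h4 <;> simp_all [Prod.ext_iff, beq_iff_eq] <;> omega

theorem ofList_zip (a b c d : Int) :
    PySem.Dict.ofList (([1, 2, 3, 4] : List Int).zip [a, b, c, d]) = PySem.Dict.mk [(1, a), (2, b), (3, c), (4, d)] := by
  rfl

-- B's score of a permutation, read off the counter, is A's per-permutation correct count
theorem score_eq (a b c d : Int) (M : List (Int × Int)) :
    ([1, 2, 3, 4] : List Int).foldl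
      (fun acc p => acc + (PySem.Dict.counter M).getD (p, (PySem.Dict.mk [(1, a), (2, b), (3, c), (4, d)]).getD p 0) 0) 0
    = (M.countP (fun x => (PySem.Dict.mk [(1, a), (2, b), (3, c), (4, d)]).get? x.1 == some x.2) : Int) := by
  rw [count_split]
  have hg : ∀ (p v : Int), (PySem.Dict.mk [(1, a), (2, b), (3, c), (4, d)]).getD p v = ((PySem.Dict.mk [(1, a), (2, b), (3, c), (4, d)]).get? p).getD v := by
    intro p v; rfl
  simp only [List.foldl_cons, List.foldl_nil, hg, get4]
  norm_num [PySem.Dict.getD_counter]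

-- ===== VERDICT (by name: the statement is the Claim_ definition above) =====
theorem find_best_permutation_spec : Claim_equal_find_best_permutation := by
  intro gt_rallies pred_rallies _
  unfold Spec_find_best_permutation find_best_permutation find_best_permutation_alt
  have hB := nested_foldl_eq (σ := PySem.Dict (Int × Int) Int × Int) gt_rallies pred_rallies
    (fun st x => (st.1.insert x (st.1.getD x 0 + 1), st.2 + 1)) (PySem.Dict.empty, 0)
  simp only [] at hB
  dsimp only
  rw [hB]
  have hB2 : List.foldl (fun (st : PySem.Dict (Int × Int) Int × Int) x => (st.1.insert x (st.1.getD x 0 + 1), st.2 + 1)) (PySem.Dict.empty, 0) (matchedPairs gt_rallies pred_rallies)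
      = (List.foldl (fun d x => d.insert x (d.getD x 0 + 1)) PySem.Dict.empty (matchedPairs gt_rallies pred_rallies),
         List.foldl (fun t _ => t + 1) (0 : Int) (matchedPairs gt_rallies pred_rallies)) :=
    pair_foldl_split (matchedPairs gt_rallies pred_rallies) (fun (d : PySem.Dict (Int × Int) Int) x => d.insert x (d.getD x 0 + 1)) (fun t _ => t + 1) PySem.Dict.empty (0 : Int)
  rw [hB2, PySem.Dict.foldl_insert_getD_add_one_eq_counter, foldl_len]
  apply congrArg (fun r : PySem.Dict Int Int × Int × Int => (r.1.items, r.2))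
  apply PySem.List.foldl_congr_mem
  intro st perm hm
  have hall : ∀ p ∈ PySem.List.permutations ([1, 2, 3, 4] : List Int) 4, p.length = 4 := by decide
  obtain ⟨a, b, c, d, rfl⟩ := List.length_eq_four.mp (hall perm hm)
  dsimp only
  rw [ofList_zip]
  have h1 := nested_foldl_eq (σ := Int × Int) gt_rallies pred_rallies
    (fun ct x => (if (PySem.Dict.mk [(1, a), (2, b), (3, c), (4, d)]).get? x.1 == some x.2 then ct.1 + 1 else ct.1, ct.2 + 1)) (0, 0)
  simp only [] at h1
  rw [h1]
  have h2 : List.foldl (fun (ct : Int × Int) x => (if (PySem.Dict.mk [(1, a), (2, b), (3, c), (4, d)]).get? x.1 == some x.2 then ct.1 + 1 else ct.1, ct.2 + 1)) (0, 0) (matchedPairs gt_rallies pred_rallies)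
      = (List.foldl (fun c' x => if (PySem.Dict.mk [(1, a), (2, b), (3, c), (4, d)]).get? x.1 == some x.2 then c' + 1 else c') (0 : Int) (matchedPairs gt_rallies pred_rallies),
         List.foldl (fun t _ => t + 1) (0 : Int) (matchedPairs gt_rallies pred_rallies)) :=
    pair_foldl_split (matchedPairs gt_rallies pred_rallies) (fun c' x => if (PySem.Dict.mk [(1, a), (2, b), (3, c), (4, d)]).get? x.1 == some x.2 then c' + 1 else c') (fun t _ => t + 1) (0 : Int) (0 : Int)
  rw [h2, foldl_count, foldl_len, score_eq]
  simp only [zero_add]
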